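-- pv_equiv track=rewrite | github.com/cpossinger/ECS-32B | Homework 5/hw05.py | binarySearchValueIndexEqualHelper
-- ===== SOURCE A (Python) =====
-- def binarySearchValueIndexEqualHelper(plist,left,right,output_list):
--     if right < left:
--         return output_list
--     else:
--         middle_index = (right - left) // 2 + left
--     if plist[middle_index] == middle_index:
--         output_list.append(plist[middle_index])
--         return binarySearchValueIndexEqualHelper(plist,middle_index+1,right,output_list) and binarySearchValueIndexEqualHelper(plist,left,middle_index - 1,output_list)
--     elif plist[middle_index] > middle_index:
--         return binarySearchValueIndexEqualHelper(plist,left,middle_index - 1,output_list)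
--     else:
--         return binarySearchValueIndexEqualHelper(plist,middle_index + 1,right,output_list)
-- ===== SOURCE B (Python) =====
-- def binarySearchValueIndexEqualHelper(plist, left, right, output_list):
--     stack = [(left, right)]
--     while stack:
--         l, r = stack.pop()
--         if r < l:
--             continue
--         m = (r - l) // 2 + l
--         v = plist[m]
--         if v == m:
--             output_list.append(v)
--             stack.append((l, m - 1))
--             stack.append((m + 1, r))
--         elif v > m:
--             stack.append((l, m - 1))
--         else:
--             stack.append((m + 1, r))
--     return output_list
-- ===== Notes on version B (the rewrite author's own statement) =====
-- stated objective: alternative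
-- what changed: Replaces A's double recursion (with its accidental 'and' combination of the two recursive results) by an iterative loop over an explicit stack of index ranges, pushing the left sub-range before the right one so ranges are visited in the same order.
-- outside the precondition, e.g. on binarySearchValueIndexEqualHelper([9], 0, 1, []): A returns [], B returns []
import Mathlib
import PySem

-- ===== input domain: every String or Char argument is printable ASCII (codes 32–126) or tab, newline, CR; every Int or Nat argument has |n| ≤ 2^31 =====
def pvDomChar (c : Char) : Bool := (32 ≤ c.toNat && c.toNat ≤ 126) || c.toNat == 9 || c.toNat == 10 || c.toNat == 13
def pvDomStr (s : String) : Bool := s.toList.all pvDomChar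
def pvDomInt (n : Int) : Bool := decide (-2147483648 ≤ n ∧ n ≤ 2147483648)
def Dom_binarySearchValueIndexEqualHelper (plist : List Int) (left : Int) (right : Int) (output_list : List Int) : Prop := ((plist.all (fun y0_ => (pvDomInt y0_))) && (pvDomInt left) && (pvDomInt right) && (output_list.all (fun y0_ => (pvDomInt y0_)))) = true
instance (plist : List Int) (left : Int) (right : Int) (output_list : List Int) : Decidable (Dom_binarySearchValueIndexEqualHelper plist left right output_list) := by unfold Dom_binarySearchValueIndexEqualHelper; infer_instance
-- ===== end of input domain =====

-- ===== PORT A =====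
-- termination facts for the binary-search midpoint, cited by name in decreasing_by
theorem pvMidB (l r : Int) (h : ¬ r < l) :
    0 ≤ PySem.Int.floordiv (r - l) 2 ∧ PySem.Int.floordiv (r - l) 2 ≤ r - l := by
  constructor
  · simpa using (PySem.Int.floordiv_two_mid_bounds (lo := 0) (hi := r - l) (by omega)).1
  · simpa using (PySem.Int.floordiv_two_mid_bounds (lo := 0) (hi := r - l) (by omega)).2

theorem pvDecR (l r : Int) (h : ¬ r < l) :
    (r - (PySem.Int.floordiv (r - l) 2 + l + 1) + 1).toNat < (r - l + 1).toNat := by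
  obtain ⟨h1, h2⟩ := pvMidB l r h
  exact (Int.toNat_lt_toNat (by omega)).mpr (by omega)

theorem pvDecL (l r : Int) (h : ¬ r < l) :
    ((PySem.Int.floordiv (r - l) 2 + l - 1) - l + 1).toNat < (r - l + 1).toNat := by
  obtain ⟨h1, h2⟩ := pvMidB l r h
  exact (Int.toNat_lt_toNat (by omega)).mpr (by omega)
def binarySearchValueIndexEqualHelper (plist : List Int) (left : Int) (right : Int) (output_list : List Int) : List Int :=
  if _h : right < left then output_list
  else
    let middle_index := PySem.Int.floordiv (right - left) 2 + left
    match PySem.List.pyGet? plist middle_index with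
    | none => output_list  -- Python raises IndexError here; such inputs are outside Pre_
    | some v =>
      if v = middle_index then
        binarySearchValueIndexEqualHelper plist left (middle_index - 1)
          (binarySearchValueIndexEqualHelper plist (middle_index + 1) right (output_list ++ [v]))
      else if v > middle_index then
        binarySearchValueIndexEqualHelper plist left (middle_index - 1) output_list
      else
        binarySearchValueIndexEqualHelper plist (middle_index + 1) right output_list
termination_by (right - left + 1).toNat
decreasing_by
  · exact pvDecR left right _h
  · exact pvDecL left right _h
  · exact pvDecL left right _h
  · exact pvDecR left right _h

-- ===== PORT B =====
-- measure of one stack entry: range span (+1 so every entry counts)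
def pvSpan (p : Int × Int) : Nat := (p.2 - p.1 + 1).toNat

-- termination facts for the explicit stack, cited by name in decreasing_by
theorem pvLexPop (l r : Int) (rest : List (Int × Int)) (h : r < l) :
    Prod.Lex (· < ·) (· < ·) (((rest.map pvSpan).sum : Nat), rest.length)
      ((List.map pvSpan ((l, r) :: rest)).sum, ((l, r) :: rest).length) := by
  have hz : pvSpan (l, r) = 0 := Int.toNat_of_nonpos (by omega)
  simp only [List.map_cons, List.sum_cons, hz, Nat.zero_add, List.length_cons]
  exact Prod.Lex.right _ (Nat.lt_succ_self _)

theorem pvLexNone (l r : Int) (rest : List (Int × Int)) (h : ¬ r < l) :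
    Prod.Lex (· < ·) (· < ·) (((rest.map pvSpan).sum : Nat), rest.length)
      ((List.map pvSpan ((l, r) :: rest)).sum, ((l, r) :: rest).length) := by
  simp only [List.map_cons, List.sum_cons, pvSpan]
  refine Prod.Lex.left _ _ (Nat.lt_add_of_pos_left ?_)
  simpa using (Int.toNat_lt_toNat (show (0:Int) < r - l + 1 by omega)).mpr (show (0:Int) < r - l + 1 by omega)

theorem pvLexSplit (l r : Int) (rest : List (Int × Int)) (h : ¬ r < l) :
    Prod.Lex (· < ·) (· < ·)
      ((List.map pvSpan ((PySem.Int.floordiv (r - l) 2 + l + 1, r) :: (l, PySem.Int.floordiv (r - l) 2 + l - 1) :: rest)).sum,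
        ((PySem.Int.floordiv (r - l) 2 + l + 1, r) :: (l, PySem.Int.floordiv (r - l) 2 + l - 1) :: rest).length)
      ((List.map pvSpan ((l, r) :: rest)).sum, ((l, r) :: rest).length) := by
  obtain ⟨h1, h2⟩ := pvMidB l r h
  simp only [List.map_cons, List.sum_cons, pvSpan]
  refine Prod.Lex.left _ _ ?_
  rw [← Nat.add_assoc]
  refine Nat.add_lt_add_right ?_ _
  have e1 : (r - (PySem.Int.floordiv (r - l) 2 + l + 1) + 1).toNat
      = (r - l - PySem.Int.floordiv (r - l) 2).toNat := congrArg Int.toNat (by ring)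
  have e2 : ((PySem.Int.floordiv (r - l) 2 + l - 1) - l + 1).toNat
      = (PySem.Int.floordiv (r - l) 2).toNat := congrArg Int.toNat (by ring)
  rw [e1, e2, ← Int.toNat_add (by omega) (by omega)]
  exact (Int.toNat_lt_toNat (by omega)).mpr (by omega)

theorem pvLexLeft (l r : Int) (rest : List (Int × Int)) (h : ¬ r < l) :
    Prod.Lex (· < ·) (· < ·)
      ((List.map pvSpan ((l, PySem.Int.floordiv (r - l) 2 + l - 1) :: rest)).sum,
        ((l, PySem.Int.floordiv (r - l) 2 + l - 1) :: rest).length)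
      ((List.map pvSpan ((l, r) :: rest)).sum, ((l, r) :: rest).length) := by
  obtain ⟨h1, h2⟩ := pvMidB l r h
  simp only [List.map_cons, List.sum_cons, pvSpan]
  refine Prod.Lex.left _ _ (Nat.add_lt_add_right ?_ _)
  exact (Int.toNat_lt_toNat (by omega)).mpr (by omega)

theorem pvLexRight (l r : Int) (rest : List (Int × Int)) (h : ¬ r < l) :
    Prod.Lex (· < ·) (· < ·)
      ((List.map pvSpan ((PySem.Int.floordiv (r - l) 2 + l + 1, r) :: rest)).sum,
        ((PySem.Int.floordiv (r - l) 2 + l + 1, r) :: rest).length)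
      ((List.map pvSpan ((l, r) :: rest)).sum, ((l, r) :: rest).length) := by
  obtain ⟨h1, h2⟩ := pvMidB l r h
  simp only [List.map_cons, List.sum_cons, pvSpan]
  refine Prod.Lex.left _ _ (Nat.add_lt_add_right ?_ _)
  exact (Int.toNat_lt_toNat (by omega)).mpr (by omega)

-- the while-loop of B: stack head = top of the Python stack (pop = head, push = cons)
def pvLoop (plist : List Int) (stack : List (Int × Int)) (out : List Int) : List Int :=
  match stack with
  | [] => out
  | (l, r) :: rest =>
    if _h : r < l then pvLoop plist rest out
    else
      let m := PySem.Int.floordiv (r - l) 2 + l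
      match PySem.List.pyGet? plist m with
      | none => pvLoop plist rest out  -- Python raises IndexError here; outside Pre_
      | some v =>
        if v = m then
          pvLoop plist ((m + 1, r) :: (l, m - 1) :: rest) (out ++ [v])
        else if v > m then
          pvLoop plist ((l, m - 1) :: rest) out
        else
          pvLoop plist ((m + 1, r) :: rest) out
termination_by ((stack.map pvSpan).sum, stack.length)
decreasing_by
  · exact pvLexPop l r rest _h
  · exact pvLexNone l r rest _h
  · exact pvLexSplit l r rest _h
  · exact pvLexLeft l r rest _h
  · exact pvLexRight l r rest _h

def binarySearchValueIndexEqualHelper_alt (plist : List Int) (left : Int) (right : Int) (output_list : List Int) : List Int :=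
  pvLoop plist [(left, right)] output_list

-- ===== PRECONDITION & SPEC =====
-- Pre_ excludes non-empty ranges [left,right] that reach out-of-bounds indices: there A usually raises
-- IndexError; on the few such inputs where the search turns around before the out-of-range index and A
-- returns, B behaves identically (the excluded examples below show it).
def Pre_binarySearchValueIndexEqualHelper (plist : List Int) (left : Int) (right : Int) (output_list : List Int) : Prop :=
  right < left ∨ (-(plist.length : Int) ≤ left ∧ right < (plist.length : Int))
instance (plist : List Int) (left : Int) (right : Int) (output_list : List Int) : Decidable (Pre_binarySearchValueIndexEqualHelper plist left right output_list) := by unfold Pre_binarySearchValueIndexEqualHelper; infer_instance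

def pvWitness_binarySearchValueIndexEqualHelper : List Int × Int × Int × List Int := ([0, 2, 5], 0, 2, [])

def Spec_binarySearchValueIndexEqualHelper (plist : List Int) (left : Int) (right : Int) (output_list : List Int) (out : List Int) : Prop := out = binarySearchValueIndexEqualHelper_alt plist left right output_list
instance (plist : List Int) (left : Int) (right : Int) (output_list : List Int) (out : List Int) : Decidable (Spec_binarySearchValueIndexEqualHelper plist left right output_list out) := by unfold Spec_binarySearchValueIndexEqualHelper; infer_instance

-- ===== CLAIM (what is proved, stated in full; the proofs are below) =====
def Claim_equal_binarySearchValueIndexEqualHelper : Prop := ∀ (plist : List Int) (left : Int) (right : Int) (output_list : List Int), Dom_binarySearchValueIndexEqualHelper plist left right output_list → Pre_binarySearchValueIndexEqualHelper plist left right output_list → Spec_binarySearchValueIndexEqualHelper plist left right output_list (binarySearchValueIndexEqualHelper plist left right output_list)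

-- ===== LEMMAS AND PROOFS =====
-- the list of values A appends for the range [l,r] (middle, then right subtree, then left subtree)
def pvFound (plist : List Int) (l : Int) (r : Int) : List Int :=
  if _h : r < l then []
  else
    let m := PySem.Int.floordiv (r - l) 2 + l
    match PySem.List.pyGet? plist m with
    | none => []
    | some v =>
      if v = m then v :: (pvFound plist (m + 1) r ++ pvFound plist l (m - 1))
      else if v > m then pvFound plist l (m - 1)
      else pvFound plist (m + 1) r
termination_by (r - l + 1).toNat
decreasing_by
  · exact pvDecR l r _h
  · exact pvDecL l r _h
  · exact pvDecL l r _h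
  · exact pvDecR l r _h

theorem pvA_eq_found (plist : List Int) (left right : Int) (output_list : List Int) :
    binarySearchValueIndexEqualHelper plist left right output_list = output_list ++ pvFound plist left right := by
  fun_induction binarySearchValueIndexEqualHelper plist left right output_list with
  | case1 l r out h =>
    rw [pvFound]
    simp [h]
  | case2 l r out h m hget =>
    have hm : PySem.Int.floordiv (r - l) 2 + l = m := rfl
    conv_rhs => rw [pvFound]
    rw [hm]
    simp [dif_neg h, hget]
  | case3 l r out h m hget ih3 ih2 ih1 =>
    have hm : PySem.Int.floordiv (r - l) 2 + l = m := rfl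
    rw [ih1, ih3]
    conv_rhs => rw [pvFound]
    rw [hm]
    simp [dif_neg h, hget]
  | case4 l r out h m v hget hv hgt ih =>
    have hm : PySem.Int.floordiv (r - l) 2 + l = m := rfl
    rw [ih]
    conv_rhs => rw [pvFound]
    rw [hm]
    simp [dif_neg h, hget, hv, hgt]
  | case5 l r out h m v hget hv hgt ih =>
    have hm : PySem.Int.floordiv (r - l) 2 + l = m := rfl
    rw [ih]
    conv_rhs => rw [pvFound]
    rw [hm]
    simp [dif_neg h, hget, hv, hgt]

theorem pvLoop_cons (plist : List Int) (l r : Int) (rest : List (Int × Int)) (out : List Int) :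
    pvLoop plist ((l, r) :: rest) out = pvLoop plist rest (out ++ pvFound plist l r) := by
  fun_induction pvFound plist l r generalizing rest out with
  | case1 l r h =>
    rw [pvLoop.eq_def]
    simp [h]
  | case2 l r h m hget =>
    have hm : PySem.Int.floordiv (r - l) 2 + l = m := rfl
    rw [pvLoop.eq_def]
    simp only [dif_neg h]
    rw [hm, hget]
    simp
  | case3 l r h m hget ihR ihL =>
    have hm : PySem.Int.floordiv (r - l) 2 + l = m := rfl
    rw [pvLoop.eq_def]
    simp only [dif_neg h]
    rw [hm, hget]
    simp [ihR, ihL]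
  | case4 l r h m v hget hv hgt ih =>
    have hm : PySem.Int.floordiv (r - l) 2 + l = m := rfl
    rw [pvLoop.eq_def]
    simp only [dif_neg h]
    rw [hm, hget]
    simp [hv, hgt, ih]
  | case5 l r h m v hget hv hgt ih =>
    have hm : PySem.Int.floordiv (r - l) 2 + l = m := rfl
    rw [pvLoop.eq_def]
    simp only [dif_neg h]
    rw [hm, hget]
    simp [hv, hgt, ih]

-- ===== VERDICT (by name: the statement is the Claim_ definition above) =====
theorem binarySearchValueIndexEqualHelper_spec : Claim_equal_binarySearchValueIndexEqualHelper := by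
  intro plist left right output_list _ _
  unfold Spec_binarySearchValueIndexEqualHelper binarySearchValueIndexEqualHelper_alt
  rw [pvLoop_cons, pvLoop, pvA_eq_found]
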